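-- pv_equiv track=rewrite | github.com/vikram-vam/fraud-ring-wip | app.py | get_display_label
-- ===== SOURCE A (Python) =====
-- def get_display_label(labels):
--     """
--     Get most specific label for visualization.
--     Prioritizes role-specific labels over generic ones.
--     """
--     # Order matters: most specific first
--     priority_order = [
--         "Claimant", "Witness", "Adjuster",  # Person roles
--         "MedicalProvider", "Attorney", "BodyShop",  # Service providers
--         "Claim", "Person"  # Generic fallback
--     ]
--
--     for priority_label in priority_order:
--         if priority_label in labels:
--             return priority_label
--
--     return labels[0] if labels else "Unknown"
-- ===== SOURCE B (Python) =====
-- def get_display_label(labels):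
--     """
--     Get most specific label for visualization.
--     Prioritizes role-specific labels over generic ones.
--     """
--     priority_order = [
--         "Claimant", "Witness", "Adjuster",
--         "MedicalProvider", "Attorney", "BodyShop",
--         "Claim", "Person"
--     ]
--     rank = {lab: i for i, lab in enumerate(priority_order)}
--     best = None
--     for lab in labels:
--         r = rank.get(lab)
--         if r is not None and (best is None or r < best):
--             best = r
--     if best is not None:
--         return priority_order[best]
--     return labels[0] if labels else "Unknown"
-- ===== Notes on version B (the rewrite author's own statement) =====
-- stated objective: alternative
-- what changed: B scans the input once, keeping the minimum rank found in a precomputed label-to-rank dict, instead of A's scan over the fixed priority list with a membership test into the input for each priority label.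
import Mathlib
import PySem

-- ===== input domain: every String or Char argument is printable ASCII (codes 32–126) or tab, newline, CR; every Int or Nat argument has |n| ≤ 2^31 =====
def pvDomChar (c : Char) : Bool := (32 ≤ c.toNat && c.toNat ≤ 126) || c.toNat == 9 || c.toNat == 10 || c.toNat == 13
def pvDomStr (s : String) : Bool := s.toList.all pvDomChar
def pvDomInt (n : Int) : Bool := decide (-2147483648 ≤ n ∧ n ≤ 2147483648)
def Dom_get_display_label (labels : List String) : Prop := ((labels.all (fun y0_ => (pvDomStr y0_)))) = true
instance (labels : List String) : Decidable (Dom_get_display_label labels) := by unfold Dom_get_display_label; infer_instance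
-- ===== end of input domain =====

-- B replaces A's scan over the fixed priority list (one membership test into the input per
-- priority label) by a single pass over the input keeping the minimum rank found in a
-- precomputed label→rank dict (objective: alternative decomposition, same result).

-- ===== PORT A =====
def pvPrio : List String :=
  ["Claimant", "Witness", "Adjuster",
   "MedicalProvider", "Attorney", "BodyShop",
   "Claim", "Person"]

-- `for priority_label in priority_order: if priority_label in labels: return priority_label`
def pvLoopA : List String → List String → Option String
  | [], _ => none
  | p :: rest, labels => if labels.contains p then some p else pvLoopA rest labels

def get_display_label (labels : List String) : String :=
  match pvLoopA pvPrio labels with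
  | some p => p
  | none => match labels with       -- labels[0] if labels else "Unknown"
            | [] => "Unknown"
            | l :: _ => l

-- ===== PORT B =====
-- rank = {lab: i for i, lab in enumerate(priority_order)}
def pvRank : PySem.Dict String Int :=
  PySem.Dict.ofList ((PySem.List.enumerate pvPrio 0).map (fun p => (p.2, p.1)))

-- loop body: r = rank.get(lab); if r is not None and (best is None or r < best): best = r
def pvStep (best : Option Int) (lab : String) : Option Int :=
  match PySem.Dict.get? pvRank lab with
  | none => best
  | some r => match best with
              | none => some r
              | some b => if r < b then some r else best

def get_display_label_alt (labels : List String) : String :=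
  match labels.foldl pvStep none with
  | some b => (PySem.List.pyGet? pvPrio b).getD ""   -- priority_order[best]; b is always a valid rank
  | none => match labels with       -- labels[0] if labels else "Unknown"
            | [] => "Unknown"
            | l :: _ => l

-- ===== PRECONDITION & SPEC =====
def Spec_get_display_label (labels : List String) (out : String) : Prop := out = get_display_label_alt labels
instance (labels : List String) (out : String) : Decidable (Spec_get_display_label labels out) := by unfold Spec_get_display_label; infer_instance

-- ===== CLAIM (what is proved, stated in full; the proofs are below) =====
def Claim_equal_get_display_label : Prop := ∀ (labels : List String), Dom_get_display_label labels → Spec_get_display_label labels (get_display_label labels)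

-- ===== LEMMAS AND PROOFS =====

theorem pvRank_lit : pvRank = PySem.Dict.mk [("Claimant",0),("Witness",1),("Adjuster",2),("MedicalProvider",3),("Attorney",4),("BodyShop",5),("Claim",6),("Person",7)] := by decide

-- a rank lookup succeeds only on the eight priority labels, returning their index
theorem pvRank_char (s : String) (j : Int) (h : PySem.Dict.get? pvRank s = some j) :
    0 ≤ j ∧ j < 8 ∧ PySem.List.pyGet? pvPrio j = some s := by
  rw [pvRank_lit] at h
  simp only [PySem.Dict.get?_mk_cons] at h
  split_ifs at h with h1 h2 h3 h4 h5 h6 h7 h8 <;>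
    first
    | (injection h with h; subst h;
       first
       | (obtain rfl := beq_iff_eq.mp h1; exact ⟨by norm_num, by norm_num, by decide⟩)
       | (obtain rfl := beq_iff_eq.mp h2; exact ⟨by norm_num, by norm_num, by decide⟩)
       | (obtain rfl := beq_iff_eq.mp h3; exact ⟨by norm_num, by norm_num, by decide⟩)
       | (obtain rfl := beq_iff_eq.mp h4; exact ⟨by norm_num, by norm_num, by decide⟩)
       | (obtain rfl := beq_iff_eq.mp h5; exact ⟨by norm_num, by norm_num, by decide⟩)
       | (obtain rfl := beq_iff_eq.mp h6; exact ⟨by norm_num, by norm_num, by decide⟩)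
       | (obtain rfl := beq_iff_eq.mp h7; exact ⟨by norm_num, by norm_num, by decide⟩)
       | (obtain rfl := beq_iff_eq.mp h8; exact ⟨by norm_num, by norm_num, by decide⟩))
    | simp [PySem.Dict.get?] at h

theorem pvRank_at (j : Int) (s : String) (hs : PySem.List.pyGet? pvPrio j = some s) (h0 : 0 ≤ j) (h8 : j < 8) :
    PySem.Dict.get? pvRank s = some j := by
  interval_cases j <;> (simp [PySem.List.pyGet?, PySem.List.pyIdx?, pvPrio] at hs; subst hs; decide)

-- the fold is none iff no input label has a rank
theorem pvFold_none_iff (labels : List String) : ∀ acc : Option Int,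
    labels.foldl pvStep acc = none ↔ (acc = none ∧ ∀ l ∈ labels, PySem.Dict.get? pvRank l = none) := by
  induction labels with
  | nil => intro acc; simp
  | cons l ls ih =>
    intro acc
    rw [List.foldl_cons, ih]
    constructor
    · rintro ⟨hstep, hall⟩
      unfold pvStep at hstep
      rcases hget : PySem.Dict.get? pvRank l with _ | r
      · rw [hget] at hstep
        exact ⟨hstep, by intro t ht; rcases List.mem_cons.mp ht with rfl | ht; exact hget; exact hall t ht⟩
      · rw [hget] at hstep
        rcases acc with _ | a
        · simp at hstep
        · simp only [] at hstep; split_ifs at hstep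
    · rintro ⟨rfl, hall⟩
      have hget : PySem.Dict.get? pvRank l = none := hall l (by simp)
      refine ⟨by unfold pvStep; rw [hget], fun t ht => hall t (by simp [ht])⟩

-- the fold computes the minimum rank occurring in the input (seeded with acc)
theorem pvFold_min (labels : List String) : ∀ (acc : Option Int) (b : Int),
    labels.foldl pvStep acc = some b →
    (acc = some b ∨ ∃ l ∈ labels, PySem.Dict.get? pvRank l = some b) ∧
    (∀ a, acc = some a → b ≤ a) ∧
    (∀ l ∈ labels, ∀ j, PySem.Dict.get? pvRank l = some j → b ≤ j) := by
  induction labels with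
  | nil => intro acc b h; simp at h; exact ⟨Or.inl (by simp [h]), by rintro a rfl; injection h with h; omega, by simp⟩
  | cons l ls ih =>
    intro acc b h
    rw [List.foldl_cons] at h
    obtain ⟨hach, hacc, hmin⟩ := ih (pvStep acc l) b h
    have hstep_le : ∀ a, acc = some a → ∀ c, pvStep acc l = some c → c ≤ a := by
      rintro a rfl c hc
      unfold pvStep at hc
      rcases hget : PySem.Dict.get? pvRank l with _ | r <;> rw [hget] at hc <;> simp at hc
      · omega
      · split_ifs at hc <;> injection hc with hc <;> omega
    have hstep_rank : ∀ r, PySem.Dict.get? pvRank l = some r → ∀ c, pvStep acc l = some c → c ≤ r := by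
      intro r hr c hc
      unfold pvStep at hc; rw [hr] at hc
      rcases acc with _ | a <;> simp at hc
      · omega
      · split_ifs at hc <;> injection hc with hc <;> omega
    have hstep_from : ∀ c, pvStep acc l = some c → acc = some c ∨ PySem.Dict.get? pvRank l = some c := by
      intro c hc
      unfold pvStep at hc
      rcases hget : PySem.Dict.get? pvRank l with _ | r <;> rw [hget] at hc
      · exact Or.inl hc
      · rcases acc with _ | a <;> simp at hc
        · exact Or.inr (by rw [hc])
        · split_ifs at hc
          · exact Or.inr hc
          · exact Or.inl hc
    refine ⟨?_, ?_, ?_⟩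
    · rcases hach with hach | ⟨t, ht, hrt⟩
      · rcases hstep_from b hach with h' | h'
        · exact Or.inl h'
        · exact Or.inr ⟨l, by simp, h'⟩
      · exact Or.inr ⟨t, by simp [ht], hrt⟩
    · rintro a rfl
      rcases hs : pvStep (some a) l with _ | c
      · exfalso; unfold pvStep at hs
        rcases hget : PySem.Dict.get? pvRank l with _ | r <;> rw [hget] at hs
        · simp at hs
        · simp only [] at hs; split_ifs at hs
      · have hba : b ≤ c := hacc c hs
        have hca : c ≤ a := hstep_le a rfl c hs
        omega
    · intro t ht j hj
      rcases List.mem_cons.mp ht with rfl | ht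
      · rcases hs : pvStep acc t with _ | c
        · unfold pvStep at hs; rw [hj] at hs
          rcases acc with _ | a
          · simp at hs
          · simp only [] at hs; split_ifs at hs
        · exact le_trans (hacc c hs) (hstep_rank j hj c hs)
      · exact hmin t ht j hj

-- if priority label k is in the input and no earlier one is, the fold returns k
theorem pvKey (labels : List String) (k : Int) (hk0 : 0 ≤ k) (hk8 : k < 8) (s : String)
    (hs : PySem.List.pyGet? pvPrio k = some s) (hmem : s ∈ labels)
    (hlt : ∀ j, 0 ≤ j → j < k → ∀ t, PySem.List.pyGet? pvPrio j = some t → t ∉ labels) :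
    labels.foldl pvStep none = some k := by
  have hr : PySem.Dict.get? pvRank s = some k := pvRank_at k s hs hk0 hk8
  rcases hfold : labels.foldl pvStep none with _ | b
  · have := ((pvFold_none_iff labels none).mp hfold).2 s hmem
    rw [hr] at this; exact absurd this (by simp)
  · obtain ⟨hach, -, hmin⟩ := pvFold_min labels none b hfold
    have hbk : b ≤ k := hmin s hmem k hr
    rcases hach with h | ⟨l, hl, hrl⟩
    · exact absurd h (by simp)
    · obtain ⟨hb0, hb8, hgb⟩ := pvRank_char l b hrl
      rcases eq_or_lt_of_le hbk with rfl | hblt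
      · rfl
      · exact absurd hl (hlt b hb0 hblt l hgb)

-- if no priority label is in the input, the fold returns none
theorem pvNoRank (labels : List String)
    (hnone : ∀ j, 0 ≤ j → j < 8 → ∀ t, PySem.List.pyGet? pvPrio j = some t → t ∉ labels) :
    labels.foldl pvStep none = none := by
  rcases hfold : labels.foldl pvStep none with _ | b
  · rfl
  · obtain ⟨hach, -, -⟩ := pvFold_min labels none b hfold
    rcases hach with h | ⟨l, hl, hrl⟩
    · exact absurd h (by simp)
    · obtain ⟨hb0, hb8, hgb⟩ := pvRank_char l b hrl
      exact absurd hl (hnone b hb0 hb8 l hgb)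

theorem pvMain (labels : List String) : get_display_label labels = get_display_label_alt labels := by
  unfold get_display_label get_display_label_alt
  simp only [pvLoopA, pvPrio]
  split_ifs with h0 h1 h2 h3 h4 h5 h6 h7
  · rw [pvKey labels 0 (by norm_num) (by norm_num) "Claimant" (by decide) (by simpa using h0)
      (by intro j hj0 hjk; omega)]
    rfl
  · rw [pvKey labels 1 (by norm_num) (by norm_num) "Witness" (by decide) (by simpa using h1)
      (by intro j hj0 hjk t ht hm; interval_cases j <;> simp [PySem.List.pyGet?, PySem.List.pyIdx?, pvPrio] at ht <;> subst ht <;> simp_all)]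
    rfl
  · rw [pvKey labels 2 (by norm_num) (by norm_num) "Adjuster" (by decide) (by simpa using h2)
      (by intro j hj0 hjk t ht hm; interval_cases j <;> simp [PySem.List.pyGet?, PySem.List.pyIdx?, pvPrio] at ht <;> subst ht <;> simp_all)]
    rfl
  · rw [pvKey labels 3 (by norm_num) (by norm_num) "MedicalProvider" (by decide) (by simpa using h3)
      (by intro j hj0 hjk t ht hm; interval_cases j <;> simp [PySem.List.pyGet?, PySem.List.pyIdx?, pvPrio] at ht <;> subst ht <;> simp_all)]
    rfl
  · rw [pvKey labels 4 (by norm_num) (by norm_num) "Attorney" (by decide) (by simpa using h4)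
      (by intro j hj0 hjk t ht hm; interval_cases j <;> simp [PySem.List.pyGet?, PySem.List.pyIdx?, pvPrio] at ht <;> subst ht <;> simp_all)]
    rfl
  · rw [pvKey labels 5 (by norm_num) (by norm_num) "BodyShop" (by decide) (by simpa using h5)
      (by intro j hj0 hjk t ht hm; interval_cases j <;> simp [PySem.List.pyGet?, PySem.List.pyIdx?, pvPrio] at ht <;> subst ht <;> simp_all)]
    rfl
  · rw [pvKey labels 6 (by norm_num) (by norm_num) "Claim" (by decide) (by simpa using h6)
      (by intro j hj0 hjk t ht hm; interval_cases j <;> simp [PySem.List.pyGet?, PySem.List.pyIdx?, pvPrio] at ht <;> subst ht <;> simp_all)]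
    rfl
  · rw [pvKey labels 7 (by norm_num) (by norm_num) "Person" (by decide) (by simpa using h7)
      (by intro j hj0 hjk t ht hm; interval_cases j <;> simp [PySem.List.pyGet?, PySem.List.pyIdx?, pvPrio] at ht <;> subst ht <;> simp_all)]
    rfl
  · rw [pvNoRank labels
      (by intro j hj0 hj8 t ht hm; interval_cases j <;> simp [PySem.List.pyGet?, PySem.List.pyIdx?, pvPrio] at ht <;> subst ht <;> simp_all)]

-- ===== VERDICT (by name: the statement is the Claim_ definition above) =====
theorem get_display_label_spec : Claim_equal_get_display_label := by
  intro labels _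
  exact pvMain labels
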